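-- pv_equiv track=rewrite | github.com/ext2txe/qwsengine | src/qwsengine/ui/about_dialog.py | _parse_webengine_versions
-- ===== SOURCE A (Python) =====
-- def _parse_webengine_versions(ua: str) -> str | None:
--     chrom = qtwe = None
--     for p in ua.split():
--         if p.startswith("Chrome/"):
--             chrom = p.split("/", 1)[-1]
--         if p.startswith("QtWebEngine/"):
--             qtwe  = p.split("/", 1)[-1]
--     bits = []
--     if chrom:
--         bits.append(f"Chromium: {chrom}")
--     if qtwe:
--         bits.append(f"QtWebEngine: {qtwe}")
--     return ", ".join(bits) if bits else None
-- ===== SOURCE B (Python) =====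
-- def _parse_webengine_versions(ua: str) -> str | None:
--     # Positional scan of the raw string (regex-style): at every index where the
--     # prefix occurs at a token boundary, read the version up to the next
--     # whitespace; the last occurrence wins. No tokenization via split().
--     def last_ver(pre):
--         best = None
--         for i in range(len(ua)):
--             if ua.startswith(pre, i) and (i == 0 or ua[i - 1].isspace()):
--                 j = i + len(pre)
--                 k = j
--                 while k < len(ua) and not ua[k].isspace():
--                     k += 1
--                 best = ua[j:k]
--         return best
--
--     chrom = last_ver("Chrome/")
--     qtwe = last_ver("QtWebEngine/")
--     bits = []
--     if chrom:
--         bits.append(f"Chromium: {chrom}")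
--     if qtwe:
--         bits.append(f"QtWebEngine: {qtwe}")
--     return ", ".join(bits) if bits else None
-- ===== Notes on version B (the rewrite author's own statement) =====
-- stated objective: alternative
-- what changed: B never tokenizes: instead of split() plus a per-token prefix test, it scans the raw string for boundary-anchored occurrences of 'Chrome/' and 'QtWebEngine/' (startswith at each index, previous char whitespace) and reads each version up to the next whitespace, keeping the last occurrence.
import Mathlib
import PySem

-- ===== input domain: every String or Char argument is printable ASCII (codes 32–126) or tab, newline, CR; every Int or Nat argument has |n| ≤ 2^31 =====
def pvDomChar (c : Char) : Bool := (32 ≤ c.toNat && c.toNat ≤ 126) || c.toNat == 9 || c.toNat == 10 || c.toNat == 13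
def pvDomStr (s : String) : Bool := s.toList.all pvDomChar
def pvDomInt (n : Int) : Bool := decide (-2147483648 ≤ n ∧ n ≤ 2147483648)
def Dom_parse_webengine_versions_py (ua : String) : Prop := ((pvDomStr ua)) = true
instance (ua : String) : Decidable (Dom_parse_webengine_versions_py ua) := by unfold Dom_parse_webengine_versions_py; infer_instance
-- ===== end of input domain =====

-- B replaces A's split()-tokenization + per-token prefix test by a positional scan of the raw
-- string (boundary-anchored prefix occurrences, version read up to the next whitespace);
-- alternative algorithm, same observable result.


-- ===== PORT A =====
-- p.split("/", 1)[-1]: "/" is a nonempty separator so splitMax? returns some nonempty list and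
-- the [-1] index never raises; the getD defaults are unreachable.
def pvSuffixA (p : String) : String :=
  (PySem.List.pyGet? ((PySem.Str.splitMax? p "/" 1).getD []) (-1)).getD ""

def parse_webengine_versions_py (ua : String) : Option String :=
  let st := (PySem.Str.split₀ ua).foldl
    (fun (st : Option String × Option String) p =>
      (if PySem.Str.startswith p "Chrome/" then some (pvSuffixA p) else st.1,
       if PySem.Str.startswith p "QtWebEngine/" then some (pvSuffixA p) else st.2)) (none, none)
  let bits : List String :=
    (match st.1 with | some c => if c == "" then [] else ["Chromium: " ++ c] | none => [])
    ++ (match st.2 with | some q => if q == "" then [] else ["QtWebEngine: " ++ q] | none => [])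
  if bits.isEmpty then none else some (PySem.Str.join ", " bits)

-- ===== PORT B =====
-- last_ver: for each index i, "ua.startswith(pre, i)" is pre.isPrefixOf (cs.drop i);
-- "ua[i-1]" is in range whenever read (1 ≤ i < len), so the getD default is unreachable;
-- the inner while that advances k to the next whitespace and slices ua[j:k] is exactly
-- takeWhile (not isspace) on the suffix starting at j = i + len(pre).
def pvLastVer (cs pre : List Char) : Option (List Char) :=
  (List.range cs.length).foldl (fun best i =>
    if pre.isPrefixOf (cs.drop i) && (i == 0 || PySem.Chars.isspace (cs.getD (i - 1) ' '))
    then some ((cs.drop (i + pre.length)).takeWhile (fun c => !PySem.Chars.isspace c))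
    else best) none

def parse_webengine_versions_py_alt (ua : String) : Option String :=
  let cs := ua.toList
  let chrom := pvLastVer cs "Chrome/".toList
  let qtwe := pvLastVer cs "QtWebEngine/".toList
  let bits : List String :=
    (match chrom with
     | some v => if v.isEmpty then [] else ["Chromium: " ++ String.ofList v]
     | none => [])
    ++ (match qtwe with
     | some v => if v.isEmpty then [] else ["QtWebEngine: " ++ String.ofList v]
     | none => [])
  if bits.isEmpty then none else some (PySem.Str.join ", " bits)

-- ===== PRECONDITION & SPEC =====
def Spec_parse_webengine_versions_py (ua : String) (out : Option String) : Prop := out = parse_webengine_versions_py_alt ua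
instance (ua : String) (out : Option String) : Decidable (Spec_parse_webengine_versions_py ua out) := by unfold Spec_parse_webengine_versions_py; infer_instance

-- ===== CLAIM (what is proved, stated in full; the proofs are below) =====
def Claim_equal_parse_webengine_versions_py : Prop := ∀ (ua : String), Dom_parse_webengine_versions_py ua → Spec_parse_webengine_versions_py ua (parse_webengine_versions_py ua)

-- ===== LEMMAS AND PROOFS =====

-- not-whitespace, the token predicate
def pvNS (c : Char) : Bool := !PySem.Chars.isspace c

-- clean recursive form of str.split()
def pvWords : List Char → List (List Char)
  | [] => []
  | c :: rest =>
    if PySem.Chars.isspace c then pvWords rest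
    else (c :: rest.takeWhile pvNS) :: pvWords (rest.dropWhile pvNS)
termination_by cs => cs.length
decreasing_by
  · simp
  · have := List.length_dropWhile_le pvNS rest; simp; omega

-- split₀.go's meaning with a pending reversed token cur
def pvWcont : List Char → List Char → List (List Char)
  | [], cur => if cur.isEmpty then [] else [cur.reverse]
  | c :: rest, cur =>
    if PySem.Chars.isspace c then
      if cur.isEmpty then pvWcont rest [] else cur.reverse :: pvWcont rest []
    else pvWcont rest (c :: cur)

-- the per-prefix extraction both programs compute, at token level
def pvM (pre cs : List Char) : List (List Char) :=
  ((pvWords cs).filter (fun t => pre.isPrefixOf t)).map (fun t => t.drop pre.length)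

def pvHitT (cs pre : List Char) (i : Nat) : Bool :=
  pre.isPrefixOf (cs.drop i) && (i == 0 || PySem.Chars.isspace (cs.getD (i - 1) ' '))
def pvHitF (cs pre : List Char) (i : Nat) : Bool :=
  pre.isPrefixOf (cs.drop i) && (i != 0 && PySem.Chars.isspace (cs.getD (i - 1) ' '))
def pvVal (cs pre : List Char) (i : Nat) : List Char :=
  (cs.drop (i + pre.length)).takeWhile (fun c => !PySem.Chars.isspace c)

lemma pv_foldl_overwrite {α β : Type} (l : List α) (pred : α → Bool) (ext : α → β)
    (init : Option β) :
    l.foldl (fun acc p => if pred p then some (ext p) else acc) init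
      = match (l.filter pred).getLast? with
        | some t => some (ext t)
        | none => init := by
  induction l generalizing init with
  | nil => rfl
  | cons p l ih =>
    by_cases hp : pred p
    · simp only [List.foldl, hp, if_true, List.filter_cons_of_pos hp, ih]
      cases h : l.filter pred with
      | nil => simp
      | cons x xs =>
        rw [List.getLast?_cons_cons]
        cases hfl : (x :: xs).getLast? with
        | none => simp [List.getLast?] at hfl
        | some t => rfl
    · have hpf : pred p = false := by simpa using hp
      simp [List.foldl, hpf, List.filter_cons_of_neg hp, ih]

lemma pv_foldl_overwrite_none {α β : Type} (l : List α) (pred : α → Bool) (ext : α → β) :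
    l.foldl (fun acc p => if pred p then some (ext p) else acc) none
      = ((l.filter pred).getLast?).map ext := by
  rw [pv_foldl_overwrite]
  cases (l.filter pred).getLast? <;> rfl

lemma pv_foldl_pair (toks : List String) (c0 q0 : Option String) :
    toks.foldl (fun (st : Option String × Option String) p =>
      (if PySem.Str.startswith p "Chrome/" then some (pvSuffixA p) else st.1,
       if PySem.Str.startswith p "QtWebEngine/" then some (pvSuffixA p) else st.2)) (c0, q0)
      = (toks.foldl (fun acc p => if PySem.Str.startswith p "Chrome/" then some (pvSuffixA p) else acc) c0,
         toks.foldl (fun acc p => if PySem.Str.startswith p "QtWebEngine/" then some (pvSuffixA p) else acc) q0) := by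
  induction toks generalizing c0 q0 with
  | nil => rfl
  | cons p l ih => simp only [List.foldl]; rw [ih]

-- ---- split₀ = pvWords ----

lemma pv_words_unfold (cs : List Char) :
    pvWords cs = (if (cs.takeWhile pvNS).isEmpty then [] else [cs.takeWhile pvNS])
      ++ pvWords (cs.dropWhile pvNS) := by
  cases cs with
  | nil => simp [pvWords]
  | cons c rest =>
    by_cases h : PySem.Chars.isspace c
    · have hns : pvNS c = false := by simp [pvNS, h]
      simp [pvWords, h, hns]
    · have hns : pvNS c = true := by simp [pvNS, h]
      simp [pvWords, h, hns]

lemma pv_go_eq (cs : List Char) : ∀ (cur : List Char) (acc : List (List Char)),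
    PySem.Chars.split₀.go cs cur acc = acc.reverse ++ pvWcont cs cur := by
  induction cs with
  | nil =>
    intro cur acc
    by_cases h : cur.isEmpty <;> simp [PySem.Chars.split₀.go, pvWcont, h]
  | cons c rest ih =>
    intro cur acc
    by_cases h : PySem.Chars.isspace c
    · by_cases hc : cur.isEmpty
      · simp [PySem.Chars.split₀.go, pvWcont, h, hc, ih]
      · simp [PySem.Chars.split₀.go, pvWcont, h, hc, ih]
    · simp [PySem.Chars.split₀.go, pvWcont, h, ih]

lemma pv_wcont_eq (cs : List Char) : ∀ (cur : List Char),
    pvWcont cs cur = (if (cur.reverse ++ cs.takeWhile pvNS).isEmpty then []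
        else [cur.reverse ++ cs.takeWhile pvNS]) ++ pvWords (cs.dropWhile pvNS) := by
  induction cs with
  | nil =>
    intro cur
    by_cases h : cur.isEmpty
    · have : cur = [] := by simpa [List.isEmpty_iff] using h
      simp [pvWcont, this, pvWords]
    · have : cur ≠ [] := by simpa [List.isEmpty_iff] using h
      simp [pvWcont, this, pvWords]
  | cons c rest ih =>
    intro cur
    by_cases h : PySem.Chars.isspace c
    · have hns : pvNS c = false := by simp [pvNS, h]
      have hw : pvWords (c :: rest) = pvWords rest := by simp [pvWords, h]
      by_cases hc : cur.isEmpty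
      · have hc' : cur = [] := by simpa [List.isEmpty_iff] using hc
        have e1 : pvWcont (c :: rest) cur = pvWcont rest [] := by simp [pvWcont, h, hc]
        rw [e1, ih]
        simp only [List.reverse_nil, List.nil_append, ← pv_words_unfold]
        simp [hc', hns, hw]
      · have hc' : cur ≠ [] := by simpa [List.isEmpty_iff] using hc
        have e1 : pvWcont (c :: rest) cur = cur.reverse :: pvWcont rest [] := by
          simp [pvWcont, h, hc]
        rw [e1, ih]
        simp only [List.reverse_nil, List.nil_append, ← pv_words_unfold]
        simp [hc', hns, hw]
    · have hns : pvNS c = true := by simp [pvNS, h]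
      have e1 : pvWcont (c :: rest) cur = pvWcont rest (c :: cur) := by simp [pvWcont, h]
      rw [e1, ih]
      simp [hns]

lemma pv_split₀_eq_words (cs : List Char) : PySem.Chars.split₀ cs = pvWords cs := by
  show PySem.Chars.split₀.go cs [] [] = pvWords cs
  rw [pv_go_eq, pv_wcont_eq]
  simpa using (pv_words_unfold cs).symm

-- ---- suffix after the first '/' ----

lemma pv_goSlash_mzero : ∀ (fuel : Nat) (l cur : List Char) (acc : List (List Char)),
    PySem.Chars.splitOnMax.go ['/'] fuel 0 l cur acc = acc.reverse ++ [cur.reverse ++ l] := by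
  intro fuel l cur acc
  cases fuel with
  | zero => simp [PySem.Chars.splitOnMax.go]
  | succ f => cases l with
    | nil => simp [PySem.Chars.splitOnMax.go]
    | cons c rest => simp [PySem.Chars.splitOnMax.go]

lemma pv_goSlash (p₀ : List Char) (hp : '/' ∉ p₀) :
    ∀ (fuel : Nat) (u cur : List Char) (acc : List (List Char)), p₀.length + 1 ≤ fuel →
    PySem.Chars.splitOnMax.go ['/'] fuel 1 (p₀ ++ '/' :: u) cur acc
      = acc.reverse ++ [cur.reverse ++ p₀, u] := by
  induction p₀ with
  | nil =>
    intro fuel u cur acc hf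
    cases fuel with
    | zero => omega
    | succ f =>
      simp [PySem.Chars.splitOnMax.go, List.isPrefixOf, pv_goSlash_mzero]
  | cons c p₀' ih =>
    intro fuel u cur acc hf
    cases fuel with
    | zero => omega
    | succ f =>
      have hcne : ('/' == c) = false := by
        have : c ≠ '/' := fun h => hp (h ▸ List.mem_cons_self)
        exact beq_eq_false_iff_ne.mpr (fun h => this h.symm)
      have hp' : '/' ∉ p₀' := fun h => hp (List.mem_cons_of_mem _ h)
      simp only [List.cons_append, PySem.Chars.splitOnMax.go, List.isPrefixOf, hcne,
        Bool.false_and]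
      rw [ih hp' f u (c :: cur) acc (by simpa using Nat.lt_succ_iff.mp (Nat.lt_of_lt_of_le (by simp) hf))]
      simp
  -- fuel bound: done above

lemma pv_suffixA_eq (p₀ u : List Char) (hp : '/' ∉ p₀) :
    pvSuffixA (String.ofList (p₀ ++ '/' :: u)) = String.ofList u := by
  unfold pvSuffixA
  rw [PySem.Str.splitMax?]
  simp only [String.toList_ofList]
  rw [PySem.Chars.splitMax?]
  simp only [show ("/" : String).toList = ['/'] from rfl, List.isEmpty_cons,
    Bool.false_eq_true, if_false]
  rw [PySem.Chars.splitOnMax]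
  have h1 : ¬ ((1 : Int) < 0) := by norm_num
  simp only [h1, if_false]
  have ht : (1 : Int).toNat = 1 := rfl
  rw [ht, pv_goSlash p₀ hp _ u [] [] (by simp)]
  simp [PySem.List.pyGet?_neg_one]

-- ---- token-local facts ----

lemma pv_prefix_takeWhile (pre : List Char) (hp : ∀ c ∈ pre, pvNS c = true) :
    ∀ (cs : List Char), pre.isPrefixOf (cs.takeWhile pvNS) = pre.isPrefixOf cs := by
  induction pre with
  | nil => intro cs; simp [List.isPrefixOf]
  | cons a pre' ih =>
    intro cs
    cases cs with
    | nil => simp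
    | cons c rest =>
      by_cases h : pvNS c
      · have := ih (fun x hx => hp x (List.mem_cons_of_mem _ hx)) rest
        simp [h, List.isPrefixOf_cons₂, this]
      · have hna : pvNS a = true := hp a List.mem_cons_self
        have : (a == c) = false := by
          refine beq_eq_false_iff_ne.mpr ?_
          intro hac; rw [hac] at hna; simp [h] at hna
        simp [h, List.isPrefixOf, this]

lemma pv_drop_takeWhile (pre cs : List Char) (hp : ∀ c ∈ pre, pvNS c = true)
    (hpre : pre.isPrefixOf cs = true) :
    (cs.drop pre.length).takeWhile pvNS = (cs.takeWhile pvNS).drop pre.length := by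
  obtain ⟨u, rfl⟩ := List.isPrefixOf_iff_prefix.mp hpre
  have htw : (pre ++ u).takeWhile pvNS = pre ++ u.takeWhile pvNS := by
    induction pre with
    | nil => rfl
    | cons a pre' ih =>
      have := hp a List.mem_cons_self
      simp [this, ih (fun c hc => hp c (List.mem_cons_of_mem _ hc))]
  rw [htw, List.drop_left, List.drop_left]

-- ---- positional scan = token extraction ----

lemma pv_hitT_succ (c : Char) (rest pre : List Char) (i : Nat) :
    pvHitT (c :: rest) pre (i + 1)
      = (if PySem.Chars.isspace c then pvHitT rest pre i else pvHitF rest pre i) := by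
  cases i with
  | zero =>
    by_cases h : PySem.Chars.isspace c <;>
      simp [pvHitT, pvHitF, h]
  | succ k =>
    by_cases h : PySem.Chars.isspace c <;>
      simp [pvHitT, pvHitF, h]

lemma pv_hitF_succ (c : Char) (rest pre : List Char) (i : Nat) :
    pvHitF (c :: rest) pre (i + 1) = pvHitT (c :: rest) pre (i + 1) := by
  simp [pvHitT, pvHitF]

lemma pv_val_succ (c : Char) (rest pre : List Char) (i : Nat) :
    pvVal (c :: rest) pre (i + 1) = pvVal rest pre i := by
  unfold pvVal
  rw [show i + 1 + pre.length = (i + pre.length) + 1 by omega, List.drop_succ_cons]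

lemma pv_scan_eq (pre : List Char) (hne : pre ≠ []) (hp : ∀ c ∈ pre, pvNS c = true) :
    ∀ (cs : List Char),
    ((List.range cs.length).filter (pvHitT cs pre)).map (pvVal cs pre) = pvM pre cs
    ∧ ((List.range cs.length).filter (pvHitF cs pre)).map (pvVal cs pre)
        = pvM pre (cs.dropWhile pvNS) := by
  intro cs
  induction cs with
  | nil => simp [pvM, pvWords]
  | cons c rest ih =>
    obtain ⟨ihT, ihF⟩ := ih
    have hshift : ∀ (hit : (List Char) → (List Char) → Nat → Bool),
        (∀ i, hit (c :: rest) pre (i + 1)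
          = (if PySem.Chars.isspace c then pvHitT rest pre i else pvHitF rest pre i)) →
        ((List.range rest.length).map Nat.succ |>.filter (hit (c :: rest) pre)).map
            (pvVal (c :: rest) pre)
          = (if PySem.Chars.isspace c then pvM pre rest else pvM pre (rest.dropWhile pvNS)) := by
      intro hit hstep
      rw [List.filter_map, List.map_map]
      have h1 : (List.range rest.length).filter (hit (c :: rest) pre ∘ Nat.succ)
          = (List.range rest.length).filter
              (if PySem.Chars.isspace c then pvHitT rest pre else pvHitF rest pre) := by
        apply List.filter_congr
        intro i _
        by_cases h : PySem.Chars.isspace c <;> simp [hstep i, h]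
      rw [h1]
      by_cases h : PySem.Chars.isspace c
      · simp only [h, if_true]
        rw [← ihT]
        apply List.map_congr_left
        intro i _
        simp [Function.comp, pv_val_succ]
      · simp only [h]
        rw [← ihF]
        apply List.map_congr_left
        intro i _
        simp [Function.comp, pv_val_succ]
    constructor
    · rw [List.length_cons, List.range_succ_eq_map]
      by_cases h : PySem.Chars.isspace c
      · have h0 : pvHitT (c :: rest) pre 0 = false := by
          obtain ⟨a, pre', rfl⟩ := List.exists_cons_of_ne_nil hne
          have hna : pvNS a = true := hp a List.mem_cons_self
          have : (a == c) = false := by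
            refine beq_eq_false_iff_ne.mpr ?_
            intro hac; rw [hac] at hna; simp [pvNS, h] at hna
          simp [pvHitT, List.isPrefixOf_cons₂, this]
        rw [List.filter_cons_of_neg (by simp [h0])]
        rw [hshift pvHitT (fun i => pv_hitT_succ c rest pre i), if_pos h]
        have : pvWords (c :: rest) = pvWords rest := by simp [pvWords, h]
        simp [pvM, this]
      · have hns : pvNS c = true := by simp [pvNS, h]
        have htw : (c :: rest).takeWhile pvNS = c :: rest.takeWhile pvNS := by
          simp [hns]
        have h0 : pvHitT (c :: rest) pre 0 = pre.isPrefixOf (c :: rest) := by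
          simp [pvHitT]
        have hwords : pvWords (c :: rest)
            = (c :: rest.takeWhile pvNS) :: pvWords (rest.dropWhile pvNS) := by
          simp [pvWords, h]
        have hpfx : pre.isPrefixOf (c :: rest.takeWhile pvNS) = pre.isPrefixOf (c :: rest) := by
          rw [← htw, pv_prefix_takeWhile pre hp]
        by_cases hpre : pre.isPrefixOf (c :: rest)
        · rw [List.filter_cons_of_pos (by simp [h0, hpre])]
          simp only [List.map_cons]
          rw [hshift pvHitT (fun i => pv_hitT_succ c rest pre i), if_neg h]
          have hval : pvVal (c :: rest) pre 0 = (c :: rest.takeWhile pvNS).drop pre.length := by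
            unfold pvVal
            rw [Nat.zero_add]
            have := pv_drop_takeWhile pre (c :: rest) hp hpre
            rw [show (fun c => !PySem.Chars.isspace c) = pvNS from rfl, this, htw]
          rw [hval]
          have hM : pvM pre (c :: rest)
              = (c :: rest.takeWhile pvNS).drop pre.length :: pvM pre (rest.dropWhile pvNS) := by
            unfold pvM
            rw [hwords, List.filter_cons_of_pos (by rw [hpfx]; exact hpre)]
            rfl
          rw [hM]
        · rw [List.filter_cons_of_neg (by simp [h0, hpre])]
          rw [hshift pvHitT (fun i => pv_hitT_succ c rest pre i), if_neg h]
          have hpfx' : pre.isPrefixOf (c :: rest.takeWhile pvNS) = false := by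
            rw [hpfx]; exact Bool.eq_false_iff.mpr hpre
          have hM : pvM pre (c :: rest) = pvM pre (rest.dropWhile pvNS) := by
            unfold pvM
            rw [hwords, List.filter_cons_of_neg (by simp [hpfx'])]
          rw [hM]
    · rw [List.length_cons, List.range_succ_eq_map]
      have h0 : pvHitF (c :: rest) pre 0 = false := by simp [pvHitF]
      rw [List.filter_cons_of_neg (by simp [h0])]
      have hstep : ∀ i, pvHitF (c :: rest) pre (i + 1)
          = (if PySem.Chars.isspace c then pvHitT rest pre i else pvHitF rest pre i) := by
        intro i; rw [pv_hitF_succ, pv_hitT_succ]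
      rw [hshift pvHitF hstep]
      by_cases h : PySem.Chars.isspace c
      · have hns : pvNS c = false := by simp [pvNS, h]
        have : pvWords (c :: rest) = pvWords rest := by simp [pvWords, h]
        simp [h, hns, pvM, this]
      · have hns : pvNS c = true := by simp [pvNS, h]
        simp [h, hns]

-- ---- the per-prefix component of each port ----

lemma pv_lastVer_eq_M (cs pre : List Char) (hne : pre ≠ []) (hp : ∀ c ∈ pre, pvNS c = true) :
    pvLastVer cs pre = (pvM pre cs).getLast? := by
  unfold pvLastVer
  refine Eq.trans (pv_foldl_overwrite_none (List.range cs.length) (pvHitT cs pre) (pvVal cs pre)) ?_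
  rw [← (pv_scan_eq pre hne hp cs).1, List.getLast?_map]

lemma pv_Aside_eq (cs pre : List Char) (preS : String) (hS : preS.toList = pre)
    (hne : pre ≠ []) (hp : ∀ c ∈ pre, pvNS c = true)
    (p₀ : List Char) (hsplit : pre = p₀ ++ ['/']) (hp₀ : '/' ∉ p₀) :
    ((PySem.Chars.split₀ cs).map String.ofList).foldl
        (fun acc p => if PySem.Str.startswith p preS then some (pvSuffixA p) else acc) none
      = (pvLastVer cs pre).map String.ofList := by
  rw [pv_foldl_overwrite_none, List.filter_map]
  have hpred : ((fun p => PySem.Str.startswith p preS) ∘ String.ofList)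
      = fun t => pre.isPrefixOf t := by
    funext t
    simp [Function.comp, PySem.Str.startswith, PySem.Chars.startswith, hS]
  rw [hpred, List.getLast?_map, pv_split₀_eq_words, pv_lastVer_eq_M cs pre hne hp]
  unfold pvM
  rw [List.getLast?_map]
  cases hlast : ((pvWords cs).filter (fun t => pre.isPrefixOf t)).getLast? with
  | none => rfl
  | some t =>
    have ht : pre.isPrefixOf t := by
      have hmem := List.mem_of_getLast? hlast
      exact (List.mem_filter.mp hmem).2
    obtain ⟨u, rfl⟩ := List.isPrefixOf_iff_prefix.mp ht
    simp only [Option.map_some]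
    rw [hsplit]
    have : (p₀ ++ ['/']) ++ u = p₀ ++ '/' :: u := by simp
    rw [this, pv_suffixA_eq p₀ u hp₀]
    have hdrop : ((p₀ ++ '/' :: u).drop (p₀ ++ ['/']).length) = u := by
      rw [show p₀ ++ '/' :: u = (p₀ ++ ['/']) ++ u by simp, List.drop_left]
    rw [hdrop]

-- String.ofList v == "" tests emptiness of v
lemma pv_ofList_beq_empty (v : List Char) : (String.ofList v == "") = v.isEmpty := by
  cases v with
  | nil => rfl
  | cons c t =>
    simp only [List.isEmpty_cons]
    refine beq_eq_false_iff_ne.mpr ?_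
    intro h
    have : (c :: t) = ("" : String).toList := by rw [← h, String.toList_ofList]
    simp at this

-- ===== VERDICT (by name: the statement is the Claim_ definition above) =====
set_option maxRecDepth 8192 in
theorem parse_webengine_versions_py_spec : Claim_equal_parse_webengine_versions_py := by
  intro ua _
  unfold Spec_parse_webengine_versions_py parse_webengine_versions_py parse_webengine_versions_py_alt
  rw [show PySem.Str.split₀ ua = (PySem.Chars.split₀ ua.toList).map String.ofList from rfl]
  rw [pv_foldl_pair]
  have e1 : ("Chrome/" : String).toList = ['C', 'h', 'r', 'o', 'm', 'e', '/'] := rfl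
  have e2 : ("QtWebEngine/" : String).toList
      = ['Q', 't', 'W', 'e', 'b', 'E', 'n', 'g', 'i', 'n', 'e', '/'] := rfl
  rw [e1, e2]
  rw [pv_Aside_eq ua.toList ['C', 'h', 'r', 'o', 'm', 'e', '/'] "Chrome/" e1 (by decide)
        (by intro c hc; fin_cases hc <;> decide)
        ['C', 'h', 'r', 'o', 'm', 'e'] (by decide) (by decide),
      pv_Aside_eq ua.toList ['Q', 't', 'W', 'e', 'b', 'E', 'n', 'g', 'i', 'n', 'e', '/']
        "QtWebEngine/" e2 (by decide)
        (by intro c hc; fin_cases hc <;> decide)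
        ['Q', 't', 'W', 'e', 'b', 'E', 'n', 'g', 'i', 'n', 'e'] (by decide) (by decide)]
  cases hc : pvLastVer ua.toList ['C', 'h', 'r', 'o', 'm', 'e', '/'] <;>
    cases hq : pvLastVer ua.toList ['Q', 't', 'W', 'e', 'b', 'E', 'n', 'g', 'i', 'n', 'e', '/'] <;>
      simp [hc, hq, pv_ofList_beq_empty]
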